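-- pv_equiv track=rewrite | github.com/nmoyern/New-Claim-Resolving-Issue-Automation | actions/era_poster.py | _parse_835_metadata
-- ===== SOURCE A (Python) =====
-- def _parse_835_metadata(content: str) -> dict:
--     """Extract BPR16 (check/EFT date CCYYMMDD), BPR02 (total), TRN02 (trace)."""
--     out = {"bpr16": "", "trn02": "", "bpr02": ""}
--     for seg in content.split("~"):
--         parts = seg.strip().split("*")
--         if not parts:
--             continue
--         if parts[0] == "BPR":
--             if len(parts) >= 17:
--                 out["bpr16"] = parts[16].strip()
--             if len(parts) >= 3:
--                 out["bpr02"] = parts[2].strip()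
--         elif parts[0] == "TRN" and len(parts) >= 3 and not out["trn02"]:
--             out["trn02"] = parts[2].strip()
--     return out
-- ===== SOURCE B (Python) =====
-- def _parse_835_metadata(content: str) -> dict:
--     """Extract BPR16 (check/EFT date CCYYMMDD), BPR02 (total), TRN02 (trace)."""
--     # Phase 1: split into parts-lists and index by segment id.
--     segs = [seg.strip().split("*") for seg in content.split("~")]
--     bprs = [p for p in segs if p[0] == "BPR"]
--     trns = [p for p in segs if p[0] == "TRN"]
--     # Phase 2: query. bpr16/bpr02 come from the last qualifying BPR segment
--     # (independently, since the length thresholds differ); trn02 from the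
--     # first TRN segment whose stripped element is non-empty.
--     bpr16 = next((p[16].strip() for p in reversed(bprs) if len(p) >= 17), "")
--     bpr02 = next((p[2].strip() for p in reversed(bprs) if len(p) >= 3), "")
--     trn02 = next((p[2].strip() for p in trns if len(p) >= 3 and p[2].strip()), "")
--     return {"bpr16": bpr16, "trn02": trn02, "bpr02": bpr02}
-- ===== Notes on version B (the rewrite author's own statement) =====
-- stated objective: alternative
-- what changed: Replaced A's single stateful scan that mutates a result dict with a two-phase decomposition: first split all segments and filter out the BPR and TRN parts-lists, then query them independently — bpr16/bpr02 from the last qualifying BPR entry (separately, since their length thresholds differ) and trn02 as the first non-empty stripped TRN value.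
import Mathlib
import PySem

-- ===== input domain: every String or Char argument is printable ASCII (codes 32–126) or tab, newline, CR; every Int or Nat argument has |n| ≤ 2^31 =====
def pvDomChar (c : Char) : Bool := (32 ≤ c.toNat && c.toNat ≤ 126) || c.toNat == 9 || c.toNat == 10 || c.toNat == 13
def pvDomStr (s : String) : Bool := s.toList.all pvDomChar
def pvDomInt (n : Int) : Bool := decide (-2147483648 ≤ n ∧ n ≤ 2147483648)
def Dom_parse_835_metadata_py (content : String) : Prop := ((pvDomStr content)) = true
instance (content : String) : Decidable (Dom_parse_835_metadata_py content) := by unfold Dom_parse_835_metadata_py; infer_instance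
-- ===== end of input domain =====

-- B replaces A's single stateful scan with a filter-then-query decomposition (same cost, different shape).

-- ===== PORT A =====
-- s.split(sep) for the non-empty literal separators used here; Str.split? is none only for sep = "", so this is exact.
def pvSplit (s sep : String) : List String := (PySem.Str.split? s sep).getD []

-- one iteration of A's loop over content.split("~"); `parts` is never empty
-- (Python's str.split with a separator always yields at least one piece), so the
-- `if not parts: continue` branch is ported but unreachable; the indexings
-- parts[16]/parts[2] are guarded by the length tests, so getD is exact.
def pvStepA (out : PySem.Dict String String) (seg : String) : PySem.Dict String String :=
  let parts := pvSplit (PySem.Str.strip seg) "*"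
  if parts.isEmpty then out
  else if parts.headI = "BPR" then
    let out1 := if 17 ≤ parts.length then out.insert "bpr16" (PySem.Str.strip (parts.getD 16 "")) else out
    if 3 ≤ parts.length then out1.insert "bpr02" (PySem.Str.strip (parts.getD 2 "")) else out1
  else if parts.headI = "TRN" ∧ 3 ≤ parts.length ∧ out.getD "trn02" "" = "" then
    out.insert "trn02" (PySem.Str.strip (parts.getD 2 ""))
  else out

def parse_835_metadata_py (content : String) : List (String × String) :=
  ((pvSplit content "~").foldl pvStepA
    (PySem.Dict.ofList [("bpr16", ""), ("trn02", ""), ("bpr02", "")])).items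

-- ===== PORT B =====
def parse_835_metadata_py_alt (content : String) : List (String × String) :=
  let segs := (pvSplit content "~").map
    (fun seg => pvSplit (PySem.Str.strip seg) "*")
  let bprs := segs.filter (fun p => decide (p.headI = "BPR"))
  let trns := segs.filter (fun p => decide (p.headI = "TRN"))
  let bpr16 := match bprs.reverse.find? (fun p => decide (17 ≤ p.length)) with
    | some p => PySem.Str.strip (p.getD 16 "")
    | none => ""
  let bpr02 := match bprs.reverse.find? (fun p => decide (3 ≤ p.length)) with
    | some p => PySem.Str.strip (p.getD 2 "")
    | none => ""
  let trn02 := match trns.find? (fun p => decide (3 ≤ p.length) && !decide (PySem.Str.strip (p.getD 2 "") = "")) with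
    | some p => PySem.Str.strip (p.getD 2 "")
    | none => ""
  [("bpr16", bpr16), ("trn02", trn02), ("bpr02", bpr02)]

-- ===== PRECONDITION & SPEC =====
def Spec_parse_835_metadata_py (content : String) (out : List (String × String)) : Prop := out = parse_835_metadata_py_alt content
instance (content : String) (out : List (String × String)) : Decidable (Spec_parse_835_metadata_py content out) := by unfold Spec_parse_835_metadata_py; infer_instance

-- ===== CLAIM (what is proved, stated in full; the proofs are below) =====
def Claim_equal_parse_835_metadata_py : Prop := ∀ (content : String), Dom_parse_835_metadata_py content → Spec_parse_835_metadata_py content (parse_835_metadata_py content)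

-- ===== LEMMAS AND PROOFS =====

-- the per-key update functions A's loop effectively performs
def pvG16 (a : String) (parts : List String) : String :=
  if parts.headI = "BPR" ∧ 17 ≤ parts.length then PySem.Str.strip (parts.getD 16 "") else a
def pvG02 (a : String) (parts : List String) : String :=
  if parts.headI = "BPR" ∧ 3 ≤ parts.length then PySem.Str.strip (parts.getD 2 "") else a
def pvGT (t : String) (parts : List String) : String :=
  if parts.headI = "TRN" ∧ 3 ≤ parts.length ∧ t = "" then PySem.Str.strip (parts.getD 2 "") else t

lemma pvStepA_items (a t b seg : String) :
    pvStepA (PySem.Dict.mk [("bpr16", a), ("trn02", t), ("bpr02", b)]) seg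
      = PySem.Dict.mk [("bpr16", pvG16 a (pvSplit (PySem.Str.strip seg) "*")),
                       ("trn02", pvGT t (pvSplit (PySem.Str.strip seg) "*")),
                       ("bpr02", pvG02 b (pvSplit (PySem.Str.strip seg) "*"))] := by
  unfold pvStepA
  set p := pvSplit (PySem.Str.strip seg) "*" with hp
  have hget : (PySem.Dict.mk [("bpr16", a), ("trn02", t), ("bpr02", b)]).getD "trn02" "" = t := by
    simp [PySem.Dict.getD, PySem.Dict.get?_mk_cons]
  by_cases hE : p.isEmpty
  · have hnil : p = [] := List.isEmpty_iff.mp hE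
    rw [if_pos hE, hnil]
    rw [show pvG16 a [] = a from if_neg (by simp [List.headI]),
        show pvGT t [] = t from if_neg (by simp [List.headI]),
        show pvG02 b [] = b from if_neg (by simp [List.headI])]
  · rw [if_neg hE]
    by_cases hB : p.headI = "BPR"
    · have hT : ¬ p.headI = "TRN" := by rw [hB]; decide
      rw [if_pos hB, show pvGT t p = t from if_neg (fun h => hT h.1)]
      by_cases h17 : 17 ≤ p.length <;> by_cases h3 : 3 ≤ p.length
      · rw [if_pos h17, if_pos h3,
            show pvG16 a p = PySem.Str.strip (p.getD 16 "") from if_pos ⟨hB, h17⟩,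
            show pvG02 b p = PySem.Str.strip (p.getD 2 "") from if_pos ⟨hB, h3⟩]
        simp [PySem.Dict.insert]
      · omega
      · rw [if_neg h17, if_pos h3,
            show pvG16 a p = a from if_neg (fun h => h17 h.2),
            show pvG02 b p = PySem.Str.strip (p.getD 2 "") from if_pos ⟨hB, h3⟩]
        simp [PySem.Dict.insert]
      · rw [if_neg h17, if_neg h3,
            show pvG16 a p = a from if_neg (fun h => h17 h.2),
            show pvG02 b p = b from if_neg (fun h => h3 h.2)]
    · rw [if_neg hB,
          show pvG16 a p = a from if_neg (fun h => hB h.1),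
          show pvG02 b p = b from if_neg (fun h => hB h.1)]
      by_cases hT : p.headI = "TRN"
      · by_cases h3 : 3 ≤ p.length
        · by_cases ht : t = ""
          · rw [if_pos ⟨hT, h3, by rw [hget, ht]⟩,
                show pvGT t p = PySem.Str.strip (p.getD 2 "") from if_pos ⟨hT, h3, ht⟩]
            simp [PySem.Dict.insert]
          · rw [if_neg (fun h => ht (hget ▸ h.2.2)),
                show pvGT t p = t from if_neg (fun h => ht h.2.2)]
        · rw [if_neg (fun h => h3 h.2.1),
              show pvGT t p = t from if_neg (fun h => h3 h.2.1)]
      · rw [if_neg (fun h => hT h.1),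
            show pvGT t p = t from if_neg (fun h => hT h.1)]

lemma pvFoldA (segs : List String) : ∀ (a t b : String),
    segs.foldl pvStepA (PySem.Dict.mk [("bpr16", a), ("trn02", t), ("bpr02", b)])
      = PySem.Dict.mk
          [("bpr16", (segs.map (fun seg => pvSplit (PySem.Str.strip seg) "*")).foldl pvG16 a),
           ("trn02", (segs.map (fun seg => pvSplit (PySem.Str.strip seg) "*")).foldl pvGT t),
           ("bpr02", (segs.map (fun seg => pvSplit (PySem.Str.strip seg) "*")).foldl pvG02 b)] := by
  induction segs with
  | nil => intro a t b; rfl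
  | cons s rest ih =>
    intro a t b
    rw [List.foldl_cons, pvStepA_items a t b s, ih, List.map_cons,
        List.foldl_cons, List.foldl_cons, List.foldl_cons]

-- bpr16: the last BPR segment with at least 17 parts wins
lemma pvLast16 (pss : List (List String)) : ∀ (a : String),
    pss.foldl pvG16 a
      = match (pss.filter (fun p => decide (p.headI = "BPR"))).reverse.find?
            (fun p => decide (17 ≤ p.length)) with
        | some p => PySem.Str.strip (p.getD 16 "")
        | none => a := by
  induction pss with
  | nil => intro a; rfl
  | cons p rest ih =>
    intro a
    rw [List.foldl_cons, ih, List.filter_cons]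
    by_cases hB : p.headI = "BPR"
    · rw [if_pos (by simp [hB]), List.reverse_cons, List.find?_append]
      cases hfind : (List.filter (fun p => decide (p.headI = "BPR")) rest).reverse.find?
          (fun p => decide (17 ≤ p.length)) with
      | some q => simp
      | none =>
        simp only [Option.none_or]
        by_cases h17 : 17 ≤ p.length
        · rw [show pvG16 a p = PySem.Str.strip (p.getD 16 "") from if_pos ⟨hB, h17⟩]
          simp [h17]
        · rw [show pvG16 a p = a from if_neg (by tauto)]
          simp [h17]
    · rw [if_neg (by simp [hB]), show pvG16 a p = a from if_neg (by tauto)]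

-- bpr02: the last BPR segment with at least 3 parts wins
lemma pvLast02 (pss : List (List String)) : ∀ (a : String),
    pss.foldl pvG02 a
      = match (pss.filter (fun p => decide (p.headI = "BPR"))).reverse.find?
            (fun p => decide (3 ≤ p.length)) with
        | some p => PySem.Str.strip (p.getD 2 "")
        | none => a := by
  induction pss with
  | nil => intro a; rfl
  | cons p rest ih =>
    intro a
    rw [List.foldl_cons, ih, List.filter_cons]
    by_cases hB : p.headI = "BPR"
    · rw [if_pos (by simp [hB]), List.reverse_cons, List.find?_append]
      cases hfind : (List.filter (fun p => decide (p.headI = "BPR")) rest).reverse.find?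
          (fun p => decide (3 ≤ p.length)) with
      | some q => simp
      | none =>
        simp only [Option.none_or]
        by_cases h3 : 3 ≤ p.length
        · rw [show pvG02 a p = PySem.Str.strip (p.getD 2 "") from if_pos ⟨hB, h3⟩]
          simp [h3]
        · rw [show pvG02 a p = a from if_neg (by tauto)]
          simp [h3]
    · rw [if_neg (by simp [hB]), show pvG02 a p = a from if_neg (by tauto)]

-- once trn02 is non-empty, A's loop never changes it again
lemma pvGT_ne (pss : List (List String)) : ∀ (t : String), t ≠ "" → pss.foldl pvGT t = t := by
  induction pss with
  | nil => intro t _; rfl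
  | cons p rest ih =>
    intro t ht
    rw [List.foldl_cons, show pvGT t p = t from if_neg (by tauto)]
    exact ih t ht

-- trn02: the first TRN segment with a non-empty stripped trace wins
lemma pvFirstTRN (pss : List (List String)) :
    pss.foldl pvGT ""
      = match (pss.filter (fun p => decide (p.headI = "TRN"))).find?
            (fun p => decide (3 ≤ p.length) && !decide (PySem.Str.strip (p.getD 2 "") = "")) with
        | some p => PySem.Str.strip (p.getD 2 "")
        | none => "" := by
  induction pss with
  | nil => rfl
  | cons p rest ih =>
    rw [List.foldl_cons, List.filter_cons]
    by_cases hT : p.headI = "TRN"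
    · rw [if_pos (by simp [hT])]
      by_cases h3 : 3 ≤ p.length
      · by_cases hs : PySem.Str.strip (p.getD 2 "") = ""
        · rw [show pvGT "" p = PySem.Str.strip (p.getD 2 "") from if_pos ⟨hT, h3, rfl⟩,
              List.find?_cons_of_neg (by simp only [List.getD] at hs; simp [h3, hs]), hs, ih]
        · rw [show pvGT "" p = PySem.Str.strip (p.getD 2 "") from if_pos ⟨hT, h3, rfl⟩,
              pvGT_ne rest _ hs, List.find?_cons_of_pos (by simp only [List.getD] at hs; simp [h3, hs])]
      · rw [show pvGT "" p = "" from if_neg (by tauto),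
            List.find?_cons_of_neg (by simp [h3]), ih]
    · rw [if_neg (by simp [hT]), show pvGT "" p = "" from if_neg (by tauto), ih]

-- ===== VERDICT (by name: the statement is the Claim_ definition above) =====
theorem parse_835_metadata_py_spec : Claim_equal_parse_835_metadata_py := by
  intro content _
  unfold Spec_parse_835_metadata_py
  simp only [parse_835_metadata_py, parse_835_metadata_py_alt]
  rw [show PySem.Dict.ofList [("bpr16", ""), ("trn02", ""), ("bpr02", "")]
      = PySem.Dict.mk [("bpr16", ""), ("trn02", ""), ("bpr02", "")] from rfl]
  rw [pvFoldA]
  rw [pvLast16, pvLast02, pvFirstTRN]
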